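-- pv_equiv track=rewrite | github.com/joelgabatin/abcmi-chatbot | Desktop/SLU CAPSTONE/System/Rasa Framework/anaconda rasa/scripts/sync_nlu.py | build_select_region_block
-- ===== SOURCE A (Python) =====
-- REGION_ALIASES = {
--     "CAR": ["CAR", "Cordillera", "Cordillera Administrative Region", "I'm in CAR", "CAR region"],
--     "Region I": ["Region I", "Region 1", "Ilocos", "Ilocos region", "Region I please"],
--     "Region II": ["Region II", "Region 2", "Cagayan Valley", "Region II please"],
--     "Region III": ["Region III", "Region 3", "Central Luzon", "Region III please"],
--     "International": ["International", "international branch", "abroad", "overseas"],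
-- }
--
-- def build_select_region_block(regions):
--     lines = ["- intent: select_region", "  examples: |"]
--     seen = set()
--     for i, r in enumerate(regions, 1):
--         name = r["name"]
--         # Add number shortcut
--         example = f"    - {i}"
--         if example not in seen:
--             lines.append(example)
--             seen.add(example)
--         # Add exact name
--         example = f"    - {name}"
--         if example not in seen:
--             lines.append(example)
--             seen.add(example)
--         # Add aliases if defined
--         for alias in REGION_ALIASES.get(name, []):
--             example = f"    - {alias}"
--             if example not in seen:
--                 lines.append(example)
--                 seen.add(example)
--     return "\n".join(lines)
-- ===== SOURCE B (Python) =====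
-- REGION_ALIASES = {
--     "CAR": ["CAR", "Cordillera", "Cordillera Administrative Region", "I'm in CAR", "CAR region"],
--     "Region I": ["Region I", "Region 1", "Ilocos", "Ilocos region", "Region I please"],
--     "Region II": ["Region II", "Region 2", "Cagayan Valley", "Region II please"],
--     "Region III": ["Region III", "Region 3", "Central Luzon", "Region III please"],
--     "International": ["International", "international branch", "abroad", "overseas"],
-- }
--
-- def build_select_region_block(regions):
--     # Phase 1: generate every candidate line, duplicates and all.
--     candidates = ["- intent: select_region", "  examples: |"]
--     for i, r in enumerate(regions, 1):
--         name = r["name"]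
--         candidates.append(f"    - {i}")
--         candidates.append(f"    - {name}")
--         candidates.extend(f"    - {alias}" for alias in REGION_ALIASES.get(name, []))
--     # Phase 2: dedup by repeatedly emitting the head and deleting its later
--     # copies from the rest -- no seen-set, no lookups against the output.
--     out, rest = [], candidates
--     while rest:
--         head, rest = rest[0], [x for x in rest[1:] if x != rest[0]]
--         out.append(head)
--     return "\n".join(out)
-- ===== Notes on version B (the rewrite author's own statement) =====
-- stated objective: alternative
-- what changed: A deduplicates while generating, testing each line against a growing seen-set; B first generates the full candidate list with no dedup state, then deduplicates by a selection-style loop that emits the head and filters its later copies out of the remaining list, so no membership structure over the already-emitted output exists at all.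
import Mathlib
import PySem

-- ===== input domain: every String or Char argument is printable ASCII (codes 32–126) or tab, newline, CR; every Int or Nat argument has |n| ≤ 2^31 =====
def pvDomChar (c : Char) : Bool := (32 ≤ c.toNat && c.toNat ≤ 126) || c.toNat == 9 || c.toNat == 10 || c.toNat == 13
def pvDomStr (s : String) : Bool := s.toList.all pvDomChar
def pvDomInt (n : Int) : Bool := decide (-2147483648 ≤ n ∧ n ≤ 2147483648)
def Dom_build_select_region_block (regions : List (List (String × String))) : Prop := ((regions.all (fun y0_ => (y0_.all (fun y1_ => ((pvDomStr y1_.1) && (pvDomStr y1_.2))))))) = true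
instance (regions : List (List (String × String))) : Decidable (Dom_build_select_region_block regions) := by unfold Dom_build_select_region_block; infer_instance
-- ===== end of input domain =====

-- B generates all candidate lines first with no dedup state, then deduplicates with a
-- selection-style loop (emit the head, filter its later copies out of the remainder);
-- objective: alternative (no seen-set / membership structure over the emitted output).

-- module constant REGION_ALIASES, shared by both Pythons
def REGION_ALIASES : PySem.Dict String (List String) := PySem.Dict.mk [
  ("CAR", ["CAR", "Cordillera", "Cordillera Administrative Region", "I'm in CAR", "CAR region"]),
  ("Region I", ["Region I", "Region 1", "Ilocos", "Ilocos region", "Region I please"]),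
  ("Region II", ["Region II", "Region 2", "Cagayan Valley", "Region II please"]),
  ("Region III", ["Region III", "Region 3", "Central Luzon", "Region III please"]),
  ("International", ["International", "international branch", "abroad", "overseas"])]

-- ===== PORT A =====
-- `if example not in seen: lines.append(example); seen.add(example)` on state (lines, seen)
def pvStepA (st : List String × PySem.Set String) (ex : String) : List String × PySem.Set String :=
  if st.2.contains ex then st else (st.1 ++ [ex], PySem.Set.add st.2 ex)

-- r["name"]: first-match lookup; `.getD ""` is only reached outside Pre_ (Python raises KeyError there)
def build_select_region_block (regions : List (List (String × String))) : String :=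
  let final := (PySem.List.enumerate regions 1).foldl
    (fun st ir =>
      let name := ((PySem.Dict.mk ir.2).get? "name").getD ""
      let st := pvStepA st ("    - " ++ PySem.Int.toStr ir.1)
      let st := pvStepA st ("    - " ++ name)
      (REGION_ALIASES.getD name []).foldl (fun st al => pvStepA st ("    - " ++ al)) st)
    (["- intent: select_region", "  examples: |"], PySem.Set.empty)
  PySem.Str.join "\n" final.1

-- ===== PORT B =====
-- the `while rest:` dedup loop on state (out, rest): emit head, filter it out of the rest
def pvDedupLoop (out rest : List String) : List String :=
  match rest with
  | [] => out
  | x :: tl => pvDedupLoop (out ++ [x]) (tl.filter (fun y => !(y == x)))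
termination_by rest.length
decreasing_by simpa using Nat.lt_succ_of_le (le_trans (List.length_filter_le _ _) (le_of_eq tl.length_attach))

def build_select_region_block_alt (regions : List (List (String × String))) : String :=
  let candidates := (PySem.List.enumerate regions 1).foldl
    (fun acc ir =>
      let name := ((PySem.Dict.mk ir.2).get? "name").getD ""
      acc ++ ["    - " ++ PySem.Int.toStr ir.1, "    - " ++ name]
          ++ (REGION_ALIASES.getD name []).map (fun al => "    - " ++ al))
    ["- intent: select_region", "  examples: |"]
  PySem.Str.join "\n" (pvDedupLoop [] candidates)

-- ===== PRECONDITION & SPEC =====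
-- Pre_ excludes exactly the inputs where r["name"] raises KeyError (both Pythons raise there).
def Pre_build_select_region_block (regions : List (List (String × String))) : Prop :=
  (regions.all (fun r => r.any (fun p => p.1 == "name"))) = true
instance (regions : List (List (String × String))) : Decidable (Pre_build_select_region_block regions) := by unfold Pre_build_select_region_block; infer_instance
def pvWitness_build_select_region_block : (List (List (String × String))) :=
  [[("name", "CAR")], [("name", "Region I")], [("name", "CAR")]]
def Spec_build_select_region_block (regions : List (List (String × String))) (out : String) : Prop := out = build_select_region_block_alt regions
instance (regions : List (List (String × String))) (out : String) : Decidable (Spec_build_select_region_block regions out) := by unfold Spec_build_select_region_block; infer_instance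

-- ===== CLAIM (what is proved, stated in full; the proofs are below) =====
def Claim_equal_build_select_region_block : Prop := ∀ (regions : List (List (String × String))), Dom_build_select_region_block regions → Pre_build_select_region_block regions → Spec_build_select_region_block regions (build_select_region_block regions)

-- ===== LEMMAS AND PROOFS =====

-- the candidate lines one region contributes (shared shape of both loops)
def pvLines (ir : Int × List (String × String)) : List String :=
  let name := ((PySem.Dict.mk ir.2).get? "name").getD ""
  ("    - " ++ PySem.Int.toStr ir.1) :: ("    - " ++ name)
    :: (REGION_ALIASES.getD name []).map (fun al => "    - " ++ al)

theorem pvStepA_inv (pref s : List String) (x : String) :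
    pvStepA (pref ++ s, s) x = (pref ++ PySem.Set.add s x, PySem.Set.add s x) := by
  simp only [pvStepA, PySem.Set.add]
  split_ifs <;> simp

theorem foldl_stepA_inv (xs : List String) (pref s : List String) :
    xs.foldl pvStepA (pref ++ s, s) = (pref ++ xs.foldl PySem.Set.add s, xs.foldl PySem.Set.add s) := by
  induction xs generalizing s with
  | nil => rfl
  | cons a t ih => simp only [List.foldl_cons, pvStepA_inv]; exact ih _

theorem contains_append_of_not_mem_left (pref s : List String) (x : String) (h : x ∉ pref) :
    PySem.Set.contains (pref ++ s) x = PySem.Set.contains s x := by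
  simp [PySem.Set.contains, h]

theorem foldl_add_append (xs : List String) (pref s : List String)
    (h : ∀ x ∈ xs, x ∉ pref) :
    xs.foldl PySem.Set.add (pref ++ s) = pref ++ xs.foldl PySem.Set.add s := by
  induction xs generalizing s with
  | nil => rfl
  | cons a t ih =>
    simp only [List.foldl_cons]
    have hna : a ∉ pref := h a (by simp)
    have hadd : PySem.Set.add (pref ++ s) a = pref ++ PySem.Set.add s a := by
      simp only [PySem.Set.add, contains_append_of_not_mem_left pref s a hna]
      split_ifs <;> simp
    rw [hadd]; exact ih _ (fun x hx => h x (by simp [hx]))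

theorem pvLine_ne_headers (t : String) :
    ("    - " ++ t) ∉ ["- intent: select_region", "  examples: |"] := by
  simp only [List.mem_cons, List.not_mem_nil, or_false]
  rintro (h | h) <;>
    · have := congrArg String.toList h; simp [String.toList_append] at this

theorem mem_pvLines_shape (ir : Int × List (String × String)) (x : String) (hx : x ∈ pvLines ir) :
    ∃ t, x = "    - " ++ t := by
  simp only [pvLines, List.mem_cons, List.mem_map] at hx
  rcases hx with h | h | ⟨a, _, h⟩
  · exact ⟨_, h⟩
  · exact ⟨_, h⟩
  · exact ⟨_, h.symm⟩

-- first-occurrence dedup commutes with filter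
theorem ofList_filter (p : String → Bool) (l : List String) :
    PySem.Set.ofList (l.filter p) = (PySem.Set.ofList l).filter p := by
  induction l with
  | nil => rfl
  | cons a l ih =>
    by_cases hp : p a = true
    · rw [List.filter_cons_of_pos hp, PySem.Set.ofList_cons, PySem.Set.ofList_cons,
        PySem.Set.discard, PySem.Set.discard, ih, List.filter_cons_of_pos hp,
        List.filter_comm]
    · rw [List.filter_cons_of_neg hp, PySem.Set.ofList_cons, PySem.Set.discard,
        List.filter_cons_of_neg hp, List.filter_filter, ih]
      refine List.filter_congr (fun y _ => ?_)
      by_cases hy : y = a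
      · subst hy; simp [hp]
      · simp [hy]

-- the selection loop computes first-occurrence dedup appended to the output so far
theorem pvDedupLoop_eq_aux (n : Nat) : ∀ (rest : List String), rest.length ≤ n →
    ∀ (out : List String), pvDedupLoop out rest = out ++ PySem.Set.ofList rest := by
  induction n with
  | zero =>
    intro rest h out
    have : rest = [] := List.eq_nil_of_length_eq_zero (Nat.le_zero.mp h)
    subst this; simp [pvDedupLoop, PySem.Set.ofList]
  | succ n ih =>
    intro rest h out
    match rest with
    | [] => simp [pvDedupLoop, PySem.Set.ofList]
    | x :: tl =>
      have hlen : (tl.filter (fun y => !(y == x))).length ≤ n :=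
        le_trans (List.length_filter_le _ _) (Nat.le_of_succ_le_succ h)
      rw [pvDedupLoop, ih _ hlen, PySem.Set.ofList_cons, PySem.Set.discard, ofList_filter]
      simp

theorem pvDedupLoop_eq (rest : List String) (out : List String) :
    pvDedupLoop out rest = out ++ PySem.Set.ofList rest :=
  pvDedupLoop_eq_aux rest.length rest le_rfl out

theorem build_A_eq (regions : List (List (String × String))) :
    build_select_region_block regions =
      PySem.Str.join "\n" (["- intent: select_region", "  examples: |"] ++
        PySem.Set.ofList ((PySem.List.enumerate regions 1).flatMap pvLines)) := by
  unfold build_select_region_block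
  have hbody : (PySem.List.enumerate regions 1).foldl
      (fun st ir =>
        let name := ((PySem.Dict.mk ir.2).get? "name").getD ""
        let st := pvStepA st ("    - " ++ PySem.Int.toStr ir.1)
        let st := pvStepA st ("    - " ++ name)
        (REGION_ALIASES.getD name []).foldl (fun st al => pvStepA st ("    - " ++ al)) st)
      (["- intent: select_region", "  examples: |"], PySem.Set.empty)
    = ((PySem.List.enumerate regions 1).flatMap pvLines).foldl pvStepA
        (["- intent: select_region", "  examples: |"], PySem.Set.empty) := by
    rw [List.foldl_flatMap]
    congr 1
    funext st ir
    simp only [pvLines, List.foldl_cons, List.foldl_map]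
  rw [hbody]
  have : (["- intent: select_region", "  examples: |"], (PySem.Set.empty : PySem.Set String))
      = ((["- intent: select_region", "  examples: |"] ++ ([] : List String)), ([] : List String)) := by
    simp [PySem.Set.empty]
  rw [this, foldl_stepA_inv, PySem.Set.ofList_eq_foldl]

theorem build_B_eq (regions : List (List (String × String))) :
    build_select_region_block_alt regions =
      PySem.Str.join "\n" (PySem.Set.ofList (["- intent: select_region", "  examples: |"] ++
        (PySem.List.enumerate regions 1).flatMap pvLines)) := by
  unfold build_select_region_block_alt
  have hfun : (fun (acc : List String) (ir : Int × List (String × String)) =>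
      let name := ((PySem.Dict.mk ir.2).get? "name").getD ""
      acc ++ ["    - " ++ PySem.Int.toStr ir.1, "    - " ++ name]
          ++ (REGION_ALIASES.getD name []).map (fun al => "    - " ++ al))
      = (fun acc ir => acc ++ pvLines ir) := by
    funext acc ir
    simp [pvLines]
  rw [hfun, PySem.List.foldl_append_eq_flatMap]
  show PySem.Str.join "\n" (pvDedupLoop [] (["- intent: select_region", "  examples: |"] ++
    (PySem.List.enumerate regions 1).flatMap pvLines)) = _
  rw [pvDedupLoop_eq]
  simp

-- ===== VERDICT (by name: the statement is the Claim_ definition above) =====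
theorem build_select_region_block_spec : Claim_equal_build_select_region_block := by
  intro regions _ _
  unfold Spec_build_select_region_block
  rw [build_A_eq, build_B_eq]
  congr 1
  rw [PySem.Set.ofList_eq_foldl, PySem.Set.ofList_eq_foldl]
  set cands := (PySem.List.enumerate regions 1).flatMap pvLines with hc
  have hstep : (["- intent: select_region", "  examples: |"] ++ cands).foldl PySem.Set.add []
      = cands.foldl PySem.Set.add (["- intent: select_region", "  examples: |"] ++ []) := by
    simp [PySem.Set.add, PySem.Set.contains]
  rw [hstep, foldl_add_append]
  intro x hx
  obtain ⟨ir, _, hmem⟩ := List.mem_flatMap.mp hx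
  obtain ⟨t, rfl⟩ := mem_pvLines_shape ir x hmem
  exact pvLine_ne_headers t
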